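-- pv_equiv track=rewrite | github.com/advecchia/hackerrank | 30-days-of-code/Day 20/solution.py | bubble_sort_algorithm
-- ===== SOURCE A (Python) =====
-- def bubble_sort_algorithm(input_n, temp_list):
--     # Track number of elements swapped during a single array traversal
--     num_swaps = 0
--     for i in range(0, input_n):
--         for j in range(0, input_n - 1):
--             # Swap adjacent elements if they are in decreasing order
--             if temp_list[j] > temp_list[j + 1]:
--                 # Do a swap in array
--                 temp_value = temp_list[j]
--                 temp_list[j] = temp_list[j + 1]
--                 temp_list[j + 1] = temp_value
--                 num_swaps += 1
--
--         # If no elements were swapped during a traversal, array is sorted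
--         if num_swaps == 0:
--             break
--
--     return [num_swaps, temp_list[0], temp_list[-1]]
-- ===== SOURCE B (Python) =====
-- def _merge(left, right):
--     # Merge two sorted lists, counting cross inversions.
--     merged = []
--     inv = 0
--     i = j = 0
--     while i < len(left) and j < len(right):
--         if left[i] <= right[j]:
--             merged.append(left[i])
--             i += 1
--         else:
--             merged.append(right[j])
--             j += 1
--             inv += len(left) - i
--     merged.extend(left[i:])
--     merged.extend(right[j:])
--     return merged, inv
--
--
-- def _sort_count(a):
--     # Merge sort returning (sorted list, inversion count).
--     if len(a) <= 1:
--         return a, 0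
--     m = len(a) // 2
--     left, x = _sort_count(a[:m])
--     right, y = _sort_count(a[m:])
--     merged, z = _merge(left, right)
--     return merged, x + y + z
--
--
-- def bubble_sort_algorithm(input_n, temp_list):
--     # Bubble sort's swap total equals the inversion count of the first
--     # input_n elements (none if input_n <= 0); count it by merge sort.
--     prefix, inv = _sort_count(temp_list[:max(input_n, 0)])
--     arr = prefix + temp_list[len(prefix):]
--     return [inv, arr[0], arr[-1]]
-- ===== Notes on version B (the rewrite author's own statement) =====
-- stated objective: faster
-- what changed: Replaces the in-place O(n^2) bubble-sort simulation by a merge-sort inversion count of the first input_n elements (bubble sort's swap total equals the inversion count of the prefix it sorts), then reads first/last off the sorted prefix followed by the untouched suffix, O(n log n).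
import Mathlib
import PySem

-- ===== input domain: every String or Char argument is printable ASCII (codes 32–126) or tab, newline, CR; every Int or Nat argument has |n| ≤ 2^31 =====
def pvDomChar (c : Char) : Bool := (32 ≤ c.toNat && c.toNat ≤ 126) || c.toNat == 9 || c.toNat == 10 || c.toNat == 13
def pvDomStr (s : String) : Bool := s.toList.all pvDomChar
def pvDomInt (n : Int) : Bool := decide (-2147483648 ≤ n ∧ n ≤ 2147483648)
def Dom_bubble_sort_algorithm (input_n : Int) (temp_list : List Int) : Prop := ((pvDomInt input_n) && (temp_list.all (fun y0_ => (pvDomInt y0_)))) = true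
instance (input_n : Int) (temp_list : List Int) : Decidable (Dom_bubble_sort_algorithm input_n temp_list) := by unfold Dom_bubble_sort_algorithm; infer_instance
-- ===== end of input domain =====

-- B replaces A's in-place bubble-sort simulation by a merge-sort inversion count of the first
-- input_n elements (faster, asymptotic: O(n log n) vs O(n^2)). A sorts a prefix of temp_list
-- IN PLACE (observable mutation); B does not mutate — the equivalence is about the return value.


-- ===== PORT A =====
-- inner 'for j in range(0, input_n - 1)' loop: conditional adjacent swap, state = (num_swaps, temp_list)
def pvInnerA (n : Int) (st : Int × List Int) : Int × List Int :=
  (PySem.List.pyRange 0 (n - 1) 1).foldl (fun st j =>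
    if PySem.List.pyGetD st.2 j 0 > PySem.List.pyGetD st.2 (j + 1) 0 then
      -- temp_value = temp_list[j]; temp_list[j] = temp_list[j+1]; temp_list[j+1] = temp_value
      let temp_value := PySem.List.pyGetD st.2 j 0
      let l1 := PySem.List.pySetD st.2 j (PySem.List.pyGetD st.2 (j + 1) 0)
      let l2 := PySem.List.pySetD l1 (j + 1) temp_value
      (st.1 + 1, l2)
    else st) st

-- outer 'for i in range(0, input_n)' loop with the 'if num_swaps == 0: break'
def pvOuterA (n : Int) : List Int → Int → List Int → Int × List Int
  | [], s, l => (s, l)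
  | _ :: rest, s, l =>
    let st := pvInnerA n (s, l)
    if st.1 = 0 then st else pvOuterA n rest st.1 st.2

def bubble_sort_algorithm (input_n : Int) (temp_list : List Int) : List Int :=
  let st := pvOuterA input_n (PySem.List.pyRange 0 input_n 1) 0 temp_list
  -- temp_list[0] / temp_list[-1] raise IndexError on []; Pre_ excludes the empty list
  [st.1, PySem.List.pyGetD st.2 0 0, PySem.List.pyGetD st.2 (-1) 0]

-- ===== PORT B =====
-- _merge: merge two sorted lists counting cross inversions ('inv += len(left) - i' on taking right)
def pvMerge : List Int → List Int → List Int × Int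
  | [], r => (r, 0)
  | x :: l, [] => (x :: l, 0)
  | x :: l, y :: r =>
    if x ≤ y then
      (x :: (pvMerge l (y :: r)).1, (pvMerge l (y :: r)).2)
    else
      (y :: (pvMerge (x :: l) r).1, (pvMerge (x :: l) r).2 + ((x :: l).length : Int))
termination_by l r => l.length + r.length

-- _sort_count: merge sort returning (sorted list, inversion count); a[:m]/a[m:] are take/drop
-- (exact: m = len(a)//2 ≥ 0, cf. PySem.List.slice_to_natCast / slice_from_natCast)
def pvSortCount (a : List Int) : List Int × Int :=
  if _h : a.length ≤ 1 then (a, 0)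
  else
    let m := a.length / 2
    let p1 := pvSortCount (a.take m)
    let p2 := pvSortCount (a.drop m)
    let p3 := pvMerge p1.1 p2.1
    (p3.1, p1.2 + p2.2 + p3.2)
termination_by a.length
decreasing_by
  · simp only [List.length_take]; omega
  · simp only [List.length_drop]; omega

def bubble_sort_algorithm_alt (input_n : Int) (temp_list : List Int) : List Int :=
  let p := pvSortCount (PySem.List.slice temp_list none (some (max input_n 0)))
  let arr := p.1 ++ PySem.List.slice temp_list (some ((p.1.length : Int))) none
  -- arr[0] / arr[-1] raise IndexError on []; Pre_ excludes the empty list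
  [p.2, PySem.List.pyGetD arr 0 0, PySem.List.pyGetD arr (-1) 0]

-- ===== PRECONDITION & SPEC =====
-- A raises IndexError exactly when temp_list is empty (temp_list[0]) or when 2 ≤ input_n and
-- input_n > len(temp_list) (index j+1 = input_n-1 out of range); with temp_list ≠ [] the case
-- input_n ≤ 1 already satisfies input_n ≤ len, so this Pre_ admits exactly the returning inputs.
def Pre_bubble_sort_algorithm (input_n : Int) (temp_list : List Int) : Prop :=
  temp_list ≠ [] ∧ input_n ≤ (temp_list.length : Int)
instance (input_n : Int) (temp_list : List Int) : Decidable (Pre_bubble_sort_algorithm input_n temp_list) := by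
  unfold Pre_bubble_sort_algorithm; infer_instance

def pvWitness_bubble_sort_algorithm : Int × List Int := (3, [3, 1, 2])

def Spec_bubble_sort_algorithm (input_n : Int) (temp_list : List Int) (out : List Int) : Prop := out = bubble_sort_algorithm_alt input_n temp_list
instance (input_n : Int) (temp_list : List Int) (out : List Int) : Decidable (Spec_bubble_sort_algorithm input_n temp_list out) := by unfold Spec_bubble_sort_algorithm; infer_instance

-- ===== CLAIM (what is proved, stated in full; the proofs are below) =====
def Claim_equal_bubble_sort_algorithm : Prop := ∀ (input_n : Int) (temp_list : List Int), Dom_bubble_sort_algorithm input_n temp_list → Pre_bubble_sort_algorithm input_n temp_list → Spec_bubble_sort_algorithm input_n temp_list (bubble_sort_algorithm input_n temp_list)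

-- ===== LEMMAS AND PROOFS =====

def pvInv : List Int → Nat
  | [] => 0
  | x :: t => t.countP (fun z => decide (z < x)) + pvInv t

def pvPass : List Int → List Int × Nat
  | [] => ([], 0)
  | [x] => ([x], 0)
  | x :: y :: t =>
    if x > y then (y :: (pvPass (x :: t)).1, (pvPass (x :: t)).2 + 1)
    else (x :: (pvPass (y :: t)).1, (pvPass (y :: t)).2)
termination_by l => l.length

theorem pvPass_length (l : List Int) : (pvPass l).1.length = l.length := by
  fun_induction pvPass l <;> simp_all

theorem pvPass_perm (l : List Int) : (pvPass l).1.Perm l := by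
  fun_induction pvPass l with
  | case1 => simp
  | case2 => simp
  | case3 x y t h ih =>
    exact (ih.cons y).trans (List.Perm.swap x y t)
  | case4 x y t h ih =>
    exact ih.cons x

theorem pvPass_zero_fix (l : List Int) (h : (pvPass l).2 = 0) : (pvPass l).1 = l := by
  fun_induction pvPass l <;> simp_all

theorem pvPass_inv (l : List Int) : pvInv l = pvInv (pvPass l).1 + (pvPass l).2 := by
  fun_induction pvPass l with
  | case1 => simp [pvInv]
  | case2 => simp [pvInv]
  | case3 x y t h ih =>
    have hperm : (pvPass (x :: t)).1.Perm (x :: t) := pvPass_perm _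
    have h1 : List.countP (fun z => decide (z < x)) (y :: t) =
        List.countP (fun z => decide (z < x)) t + 1 := by
      simp [h]
    have h2 : List.countP (fun z => decide (z < y)) (x :: t) =
        List.countP (fun z => decide (z < y)) t := by
      rw [List.countP_cons]; simp; omega
    simp only [pvInv, hperm.countP_eq] at ih ⊢
    omega
  | case4 x y t h ih =>
    have hperm : (pvPass (y :: t)).1.Perm (y :: t) := pvPass_perm _
    have h1 : List.countP (fun z => decide (z < x)) (y :: t) =
        List.countP (fun z => decide (z < x)) t := by
      rw [List.countP_cons]; simp; omega
    simp only [pvInv, hperm.countP_eq] at ih ⊢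
    omega

theorem pvPass_exists_max (l : List Int) (h : l ≠ []) :
    ∃ r M, (pvPass l).1 = r ++ [M] ∧ ∀ a ∈ l, a ≤ M := by
  fun_induction pvPass l with
  | case1 => simp at h
  | case2 x => exact ⟨[], x, by simp⟩
  | case3 x y t h' ih =>
    obtain ⟨r, M, hr, hM⟩ := ih (by simp)
    refine ⟨y :: r, M, by simp [hr], ?_⟩
    intro a ha
    rcases List.mem_cons.mp ha with rfl | ha'
    · exact hM a (by simp)
    rcases List.mem_cons.mp ha' with rfl | ha''
    · exact le_trans (le_of_lt h') (hM x (by simp))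
    · exact hM a (by simp [ha''])
  | case4 x y t h' ih =>
    obtain ⟨r, M, hr, hM⟩ := ih (by simp)
    refine ⟨x :: r, M, by simp [hr], ?_⟩
    intro a ha
    rcases List.mem_cons.mp ha with rfl | ha'
    · exact le_trans (not_lt.mp h') (hM y (by simp))
    · exact hM a ha'

theorem pvPass_snoc_max (l : List Int) (M : Int) (h : ∀ a ∈ l, a ≤ M) :
    pvPass (l ++ [M]) = ((pvPass l).1 ++ [M], (pvPass l).2) := by
  fun_induction pvPass l with
  | case1 => simp [pvPass]
  | case2 x => simp [pvPass, not_lt.mpr (h x (by simp))]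
  | case3 x y t h' ih =>
    have hih := ih (by
      intro a ha
      rcases List.mem_cons.mp ha with rfl | h2
      · exact h a (by simp)
      · exact h a (by simp [h2]))
    simp only [List.cons_append, pvPass, if_pos h']
    rw [List.cons_append] at hih
    simp [hih]
  | case4 x y t h' ih =>
    have hih := ih (by
      intro a ha
      rcases List.mem_cons.mp ha with rfl | h2
      · exact h a (by simp)
      · exact h a (by simp [h2]))
    simp only [List.cons_append, pvPass, if_neg h']
    rw [List.cons_append] at hih
    simp [hih]

def pvPassIter : Nat → List Int → List Int
  | 0, l => l
  | m + 1, l => pvPassIter m (pvPass l).1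

theorem pvPassIter_perm (m : Nat) (l : List Int) : (pvPassIter m l).Perm l := by
  induction m generalizing l with
  | zero => simp [pvPassIter]
  | succ m ih => exact (ih (pvPass l).1).trans (pvPass_perm l)

theorem pvPassIter_snoc_max (m : Nat) (l : List Int) (M : Int) (h : ∀ a ∈ l, a ≤ M) :
    pvPassIter m (l ++ [M]) = pvPassIter m l ++ [M] := by
  induction m generalizing l with
  | zero => simp [pvPassIter]
  | succ m ih =>
    simp only [pvPassIter, pvPass_snoc_max l M h]
    exact ih (pvPass l).1 (fun a ha => h a ((pvPass_perm l).mem_iff.mp ha))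

theorem pvPassIter_sorted (m : Nat) (l : List Int) (h : l.length ≤ m) :
    (pvPassIter m l).Pairwise (· ≤ ·) := by
  induction m generalizing l with
  | zero =>
    have : l = [] := List.eq_nil_of_length_eq_zero (by omega)
    simp [this, pvPassIter]
  | succ m ih =>
    rcases List.eq_nil_or_concat' l with rfl | ⟨_, _, _⟩
    · have : pvPassIter (m+1) ([] : List Int) = [] := by
        have := pvPassIter_perm (m+1) ([] : List Int)
        simpa using this.eq_nil
      simp [this]
    · -- l nonempty
      have hne : l ≠ [] := by rename_i t x hl; simp [hl]
      obtain ⟨r, M, hr, hM⟩ := pvPass_exists_max l hne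
      simp only [pvPassIter, hr]
      have hrM : ∀ a ∈ r, a ≤ M := by
        intro a ha
        exact hM a ((pvPass_perm l).mem_iff.mp (by simp [hr, ha]))
      rw [pvPassIter_snoc_max m r M hrM]
      have hrlen : r.length ≤ m := by
        have := pvPass_length l
        rw [hr] at this; simp at this; omega
      have hsorted := ih r hrlen
      rw [List.pairwise_append]
      refine ⟨hsorted, by simp, ?_⟩
      intro a ha b hb
      have : a ∈ r := (pvPassIter_perm m r).mem_iff.mp ha
      simp at hb; subst hb
      exact hrM a this

theorem pvInv_sorted (l : List Int) (h : l.Pairwise (· ≤ ·)) : pvInv l = 0 := by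
  induction l with
  | nil => simp [pvInv]
  | cons x t ih =>
    rcases List.pairwise_cons.mp h with ⟨hx, ht⟩
    simp only [pvInv, ih ht]
    have : t.countP (fun z => decide (z < x)) = 0 := by
      rw [List.countP_eq_zero]
      intro a ha
      simp only [decide_eq_true_eq]
      exact not_lt.mpr (hx a ha)
    omega

theorem pvPass_snoc (l : List Int) (z : Int) (r : List Int) (M : Int)
    (hr : (pvPass l).1 = r ++ [M]) :
    pvPass (l ++ [z]) =
      if M > z then (r ++ [z, M], (pvPass l).2 + 1) else (r ++ [M, z], (pvPass l).2) := by
  fun_induction pvPass l generalizing r with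
  | case1 => simp at hr
  | case2 =>
    rename_i w
    simp only at hr
    cases r with
    | nil =>
      simp at hr
      subst hr
      by_cases hxz : w > z <;> simp [pvPass, hxz]
    | cons b bs => simp at hr
  | case3 x y t h' ih =>
    have hPne : (pvPass (x :: t)).1 ≠ [] := by
      have := pvPass_length (x :: t); intro hc; rw [hc] at this; simp at this
    cases r with
    | nil =>
      exfalso; simp at hr
      rcases hr with ⟨_, h2⟩; exact hPne h2
    | cons b r' =>
      simp only [List.cons_append, List.cons.injEq] at hr
      rcases hr with ⟨rfl, hr'⟩
      have hih := ih r' hr'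
      rw [List.cons_append] at hih
      simp only [List.cons_append, pvPass, if_pos h']
      by_cases hMz : M > z <;> simp [hMz] at hih ⊢ <;> simp [hih]
  | case4 x y t h' ih =>
    have hPne : (pvPass (y :: t)).1 ≠ [] := by
      have := pvPass_length (y :: t); intro hc; rw [hc] at this; simp at this
    cases r with
    | nil =>
      exfalso; simp at hr
      rcases hr with ⟨_, h2⟩; exact hPne h2
    | cons b r' =>
      simp only [List.cons_append, List.cons.injEq] at hr
      rcases hr with ⟨rfl, hr'⟩
      have hih := ih r' hr'
      rw [List.cons_append] at hih
      simp only [List.cons_append, pvPass, if_neg h']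
      by_cases hMz : M > z <;> simp [hMz] at hih ⊢ <;> simp [hih]

def pvF (N : Nat) (st : Int × List Int) : Int × List Int :=
  ((st.1 + ((pvPass (st.2.take N)).2 : Int)), (pvPass (st.2.take N)).1 ++ st.2.drop N)

theorem pvInnerA_eq_pvF (N : Nat) (st : Int × List Int) (h : N ≤ st.2.length) :
    pvInnerA (N : Int) st = pvF N st := by
  induction N generalizing st with
  | zero =>
    simp only [pvInnerA, pvF]
    rw [PySem.List.pyRange_one_eq_nil (by omega)]
    simp [pvPass]
  | succ N ih =>
    obtain ⟨s, l⟩ := st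
    simp only at h
    by_cases hN : N = 0
    · subst hN
      obtain ⟨a, l', rfl⟩ : ∃ a l', l = a :: l' := by
        cases l with
        | nil => simp at h
        | cons a l' => exact ⟨a, l', rfl⟩
      simp only [pvInnerA, pvF]
      rw [PySem.List.pyRange_one_eq_nil (by omega)]
      simp [pvPass]
    · -- N ≥ 1
      have h1N : 1 ≤ N := by omega
      have hstep : ((N + 1 : Nat) : Int) - 1 = ((N : Int) - 1) + 1 := by push_cast; ring
      have hsplit : PySem.List.pyRange 0 (((N + 1 : Nat) : Int) - 1) 1
          = PySem.List.pyRange 0 ((N : Int) - 1) 1 ++ [(N : Int) - 1] := by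
        rw [hstep, PySem.List.pyRange_one_succ_right (by omega)]
      simp only [pvInnerA] at ih ⊢
      rw [hsplit, List.foldl_append]
      rw [ih (s, l) (by simp; omega)]
      -- now one step at index j = N - 1 on state pvF N (s, l)
      simp only [List.foldl_cons, List.foldl_nil]
      set p := l.take N with hp
      have hlne : l ≠ [] := by
        intro hc; subst hc; simp at h
      have hpne : p ≠ [] := by
        simp [hp, List.take_eq_nil_iff, hlne]
        omega
      obtain ⟨r, M, hr, hM⟩ := pvPass_exists_max p hpne
      have hplen : p.length = N := by simp [hp]; omega
      have hPlen : (pvPass p).1.length = N := by rw [pvPass_length]; exact hplen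
      have hrlen : r.length = N - 1 := by
        rw [hr] at hPlen; simp at hPlen; omega
      have hNlt : N < l.length := by omega
      have hdrop : l.drop N = l[N] :: l.drop (N + 1) := List.drop_eq_getElem_cons hNlt
      set z := l[N] with hz
      set D := l.drop (N + 1) with hD
      have hcur : (pvF N (s, l)).2 = r ++ M :: z :: D := by
        simp only [pvF, ← hp, hr, hdrop]
        simp
      have hcur1 : (pvF N (s, l)).1 = s + ((pvPass p).2 : Int) := by simp [pvF, ← hp]
      -- index values
      have hjcast : ((N : Int) - 1) = ((N - 1 : Nat) : Int) := by omega
      have hjcast1 : ((N : Int) - 1) + 1 = ((N : Nat) : Int) := by omega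
      have hget1 : PySem.List.pyGetD (pvF N (s, l)).2 ((N : Int) - 1) 0 = M := by
        rw [hjcast, PySem.List.pyGetD_natCast, hcur]
        have : (N - 1 : Nat) = r.length := by omega
        rw [this]
        simp [List.getD_eq_getElem?_getD]
      have hget2 : PySem.List.pyGetD (pvF N (s, l)).2 (((N : Int) - 1) + 1) 0 = z := by
        rw [hjcast1, PySem.List.pyGetD_natCast, hcur]
        have hN' : (N : Nat) = (r ++ [M]).length := by simp; omega
        rw [hN']
        rw [show r ++ M :: z :: D = (r ++ [M]) ++ z :: D by simp]
        simp [List.getD_eq_getElem?_getD]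
      -- the take (N+1) prefix and its pass
      have htake : l.take (N + 1) = p ++ [z] := by
        rw [hp, List.take_add_one]
        simp [List.getElem?_eq_getElem hNlt, hz]
      have hsnoc := pvPass_snoc p z r M hr
      simp only [hget1, hget2]
      by_cases hswap : M > z
      · rw [if_pos hswap]
        rw [if_pos hswap] at hsnoc
        -- swapped update
        have hset : PySem.List.pySetD
            (PySem.List.pySetD (pvF N (s, l)).2 ((N : Int) - 1) z) (((N : Int) - 1) + 1) M
            = r ++ z :: M :: D := by
          rw [hjcast1, hjcast, PySem.List.pySetD_natCast, PySem.List.pySetD_natCast, hcur]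
          have h1 : (N - 1 : Nat) = r.length := by omega
          rw [h1, List.set_append_right _ _ (le_refl _)]
          simp only [Nat.sub_self, List.set_cons_zero]
          have h2 : (N : Nat) = (r ++ [z]).length := by simp; omega
          rw [show r ++ z :: z :: D = (r ++ [z]) ++ z :: D by simp]
          rw [h2, List.set_append_right _ _ (le_refl _)]
          simp
        rw [hset]
        simp only [pvF, htake, hsnoc, Prod.mk.injEq]
        constructor
        · push_cast; ring
        · simp [← hD]
      · rw [if_neg hswap]
        rw [if_neg hswap] at hsnoc
        simp only [pvF, htake, hsnoc, Prod.mk.injEq]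
        constructor
        · ring
        · rw [← hp, hr]; simp; exact hdrop

def pvFIter (N : Nat) : Nat → (Int × List Int) → Int × List Int
  | 0, st => st
  | m + 1, st => pvFIter N m (pvF N st)

theorem pvInnerA_eq_pvF' (n : Int) (st : Int × List Int) (h : n ≤ (st.2.length : Int)) :
    pvInnerA n st = pvF n.toNat st := by
  by_cases hn : 0 ≤ n
  · have hc : n = ((n.toNat : Nat) : Int) := by omega
    rw [hc]
    exact pvInnerA_eq_pvF n.toNat st (by omega)
  · have h0 : n.toNat = 0 := by omega
    rw [h0]
    simp only [pvInnerA, pvF]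
    rw [PySem.List.pyRange_one_eq_nil (by omega)]
    simp [pvPass]

theorem pvFIter_fixed (N m : Nat) (st : Int × List Int) (hfix : pvF N st = st) :
    pvFIter N m st = st := by
  induction m with
  | zero => rfl
  | succ m ih => simp only [pvFIter, hfix, ih]

theorem pvF_length (N : Nat) (st : Int × List Int) : (pvF N st).2.length = st.2.length := by
  simp [pvF, pvPass_length]; omega

theorem pvOuterA_eq_pvFIter (n : Int) (fuel : List Int) (s : Int) (l : List Int)
    (hs : 0 ≤ s) (h : n ≤ (l.length : Int)) :
    pvOuterA n fuel s l = pvFIter n.toNat fuel.length (s, l) := by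
  induction fuel generalizing s l with
  | nil => rfl
  | cons f rest ih =>
    simp only [pvOuterA, pvInnerA_eq_pvF' n (s, l) h]
    have hc : (0 : Int) ≤ ((pvPass ((s, l).2.take n.toNat)).2 : Int) := by positivity
    by_cases h0 : (pvF n.toNat (s, l)).1 = 0
    · rw [if_pos h0]
      have hs0 : s = 0 ∧ ((pvPass (l.take n.toNat)).2 : Int) = 0 := by
        simp only [pvF] at h0
        constructor <;> omega
      have hfix : pvF n.toNat (s, l) = (s, l) := by
        have hz : (pvPass (l.take n.toNat)).2 = 0 := by exact_mod_cast hs0.2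
        simp only [pvF, pvPass_zero_fix _ hz, List.take_append_drop]
        simp [hz]
      rw [hfix, List.length_cons, pvFIter, hfix, pvFIter_fixed _ _ _ hfix]
    · rw [if_neg h0]
      have hlen2 : (pvF n.toNat (s, l)).2.length = l.length := pvF_length _ _
      have := ih (pvF n.toNat (s, l)).1 (pvF n.toNat (s, l)).2
        (by simp only [pvF]; omega) (by rw [hlen2]; exact h)
      rw [List.length_cons, pvFIter, this]

theorem pvFIter_spec (N m : Nat) (s : Int) (l : List Int) (h : N ≤ l.length) :
    pvFIter N m (s, l) =
      (s + (pvInv (l.take N) : Int) - (pvInv (pvPassIter m (l.take N)) : Int),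
       pvPassIter m (l.take N) ++ l.drop N) := by
  induction m generalizing s l with
  | zero =>
    simp [pvFIter, pvPassIter]
  | succ m ih =>
    have hPlen : (pvPass (l.take N)).1.length = N := by
      rw [pvPass_length]; simp; omega
    have hl2 : (pvF N (s, l)).2 = (pvPass (l.take N)).1 ++ l.drop N := by simp [pvF]
    have htake2 : (pvF N (s, l)).2.take N = (pvPass (l.take N)).1 := by
      rw [hl2, List.take_left' hPlen]
    have hdrop2 : (pvF N (s, l)).2.drop N = l.drop N := by
      rw [hl2, List.drop_left' hPlen]
    have hlen2 : N ≤ (pvF N (s, l)).2.length := by rw [pvF_length]; omega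
    simp only [pvFIter]
    have hF1 : (pvF N (s, l)).1 = s + ((pvPass (l.take N)).2 : Int) := by simp [pvF]
    have := ih (pvF N (s, l)).1 (pvF N (s, l)).2 hlen2
    rw [Prod.mk.eta] at this
    rw [this, htake2, hdrop2, hF1]
    have hinv := pvPass_inv (l.take N)
    simp only [pvPassIter, Prod.mk.injEq]
    exact ⟨by omega, trivial⟩

def pvCross (l r : List Int) : Nat := (r.map (fun y => l.countP (fun x => decide (y < x)))).sum

theorem pvCross_nil_left (r : List Int) : pvCross [] r = 0 := by
  simp [pvCross]

theorem pvCross_cons_right (l : List Int) (y : Int) (r : List Int) :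
    pvCross l (y :: r) = l.countP (fun x => decide (y < x)) + pvCross l r := by
  simp [pvCross]

theorem pvCross_cons_left (x : Int) (l r : List Int) :
    pvCross (x :: l) r = r.countP (fun y => decide (y < x)) + pvCross l r := by
  induction r with
  | nil => simp [pvCross]
  | cons y r ih =>
    simp only [pvCross_cons_right, ih, List.countP_cons]
    by_cases hyx : y < x <;> simp [hyx] <;> omega

theorem pvInv_append (l r : List Int) : pvInv (l ++ r) = pvInv l + pvInv r + pvCross l r := by
  induction l with
  | nil => simp [pvInv, pvCross_nil_left]
  | cons x l ih =>
    simp only [List.cons_append, pvInv, ih, List.countP_append, pvCross_cons_left]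
    have : r.countP (fun z => decide (z < x)) = r.countP (fun y => decide (y < x)) := rfl
    omega

theorem pvCross_perm_left (l l' r : List Int) (h : l.Perm l') : pvCross l r = pvCross l' r := by
  simp only [pvCross]
  congr 1
  exact List.map_congr_left (fun y _ => h.countP_eq _)

theorem pvCross_perm_right (l r r' : List Int) (h : r.Perm r') : pvCross l r = pvCross l r' := by
  exact (h.map _).sum_eq

theorem pvMerge_perm (l r : List Int) : (pvMerge l r).1.Perm (l ++ r) := by
  fun_induction pvMerge l r with
  | case1 r => simp
  | case2 x l => simp
  | case3 x l y r h ih =>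
    simpa using ih.cons x
  | case4 x l y r h ih =>
    refine (ih.cons y).trans ?_
    have : (x :: l) ++ y :: r = (x :: l) ++ [y] ++ r := by simp
    rw [this]
    have h2 : (y :: (x :: l)).Perm ((x :: l) ++ [y]) := by
      simpa using List.perm_append_singleton y (x :: l) |>.symm
    simpa using h2.append_right r

theorem pvMerge_sorted (l r : List Int) (hl : l.Pairwise (· ≤ ·)) (hr : r.Pairwise (· ≤ ·)) :
    (pvMerge l r).1.Pairwise (· ≤ ·) := by
  fun_induction pvMerge l r with
  | case1 r => simpa using hr
  | case2 x l => simpa using hl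
  | case3 x l y r h ih =>
    rcases List.pairwise_cons.mp hl with ⟨hx, hl'⟩
    refine List.pairwise_cons.mpr ⟨?_, ih hl' hr⟩
    intro b hb
    have hb' : b ∈ l ++ y :: r := (pvMerge_perm l (y :: r)).mem_iff.mp hb
    rcases List.mem_append.mp hb' with hbl | hbr
    · exact hx b hbl
    · rcases List.mem_cons.mp hbr with rfl | hbr'
      · exact h
      · rcases List.pairwise_cons.mp hr with ⟨hy, _⟩
        exact le_trans h (hy b hbr')
  | case4 x l y r h ih =>
    rcases List.pairwise_cons.mp hr with ⟨hy, hr'⟩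
    refine List.pairwise_cons.mpr ⟨?_, ih hl hr'⟩
    intro b hb
    have hb' : b ∈ (x :: l) ++ r := (pvMerge_perm (x :: l) r).mem_iff.mp hb
    rcases List.mem_append.mp hb' with hbl | hbr
    · rcases List.mem_cons.mp hbl with rfl | hbl'
      · omega
      · rcases List.pairwise_cons.mp hl with ⟨hx, _⟩
        have := hx b hbl'
        omega
    · exact hy b hbr

theorem pvMerge_count (l r : List Int) (hl : l.Pairwise (· ≤ ·)) (hr : r.Pairwise (· ≤ ·)) :
    (pvMerge l r).2 = (pvCross l r : Int) := by
  fun_induction pvMerge l r with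
  | case1 r => simp [pvCross_nil_left]
  | case2 x l => simp [pvCross]
  | case3 x l y r h ih =>
    rcases List.pairwise_cons.mp hl with ⟨hx, hl'⟩
    simp only [ih hl' hr]
    congr 1
    rw [pvCross_cons_left]
    have : (y :: r).countP (fun b => decide (b < x)) = 0 := by
      rw [List.countP_eq_zero]
      intro b hb
      simp only [decide_eq_true_eq]
      rcases List.mem_cons.mp hb with rfl | hbr
      · omega
      · rcases List.pairwise_cons.mp hr with ⟨hy, _⟩
        have := hy b hbr
        omega
    omega
  | case4 x l y r h ih =>
    rcases List.pairwise_cons.mp hr with ⟨hy, hr'⟩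
    rw [ih hl hr']
    rw [pvCross_cons_right]
    have : (x :: l).countP (fun b => decide (y < b)) = (x :: l).length := by
      rw [List.countP_eq_length]
      intro b hb
      simp only [decide_eq_true_eq]
      rcases List.mem_cons.mp hb with rfl | hbl
      · omega
      · rcases List.pairwise_cons.mp hl with ⟨hx, _⟩
        have := hx b hbl
        omega
    push_cast [this]
    ring

theorem pvSortCount_spec (a : List Int) :
    (pvSortCount a).1.Perm a ∧ (pvSortCount a).1.Pairwise (· ≤ ·) ∧
      (pvSortCount a).2 = (pvInv a : Int) := by
  fun_induction pvSortCount a with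
  | case1 a h =>
    refine ⟨List.Perm.refl a, ?_, ?_⟩
    · match a, h with
      | [], _ => simp
      | [x], _ => simp
    · match a, h with
      | [], _ => simp [pvInv]
      | [x], _ => simp [pvInv]
  | case2 a h m p1 p2 p3 ih1 ih2 =>
    obtain ⟨hperm1, hsort1, hcnt1⟩ := ih1
    obtain ⟨hperm2, hsort2, hcnt2⟩ := ih2
    have hmp := pvMerge_perm p1.1 p2.1
    have hperm : p3.1.Perm a := by
      refine hmp.trans ?_
      refine ((hperm1.append hperm2).trans ?_)
      rw [List.take_append_drop]
    refine ⟨hperm, pvMerge_sorted _ _ hsort1 hsort2, ?_⟩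
    have hcount := pvMerge_count p1.1 p2.1 hsort1 hsort2
    have hcross : pvCross p1.1 p2.1 = pvCross (a.take m) (a.drop m) := by
      rw [pvCross_perm_left _ _ _ hperm1, pvCross_perm_right _ _ _ hperm2]
    have hinv : pvInv a = pvInv (a.take m) + pvInv (a.drop m) + pvCross (a.take m) (a.drop m) := by
      conv_lhs => rw [← List.take_append_drop m a]
      exact pvInv_append _ _
    rw [hcnt1, hcnt2, hcount, hcross]
    push_cast [hinv]
    ring

theorem final_assembly (input_n : Int) (l : List Int) (_hne : l ≠ [])
    (hlen : input_n ≤ (l.length : Int)) :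
    bubble_sort_algorithm input_n l = bubble_sort_algorithm_alt input_n l := by
  set N := input_n.toNat with hN
  have hNle : N ≤ l.length := by omega
  set p := l.take N with hp
  set S := pvPassIter N p with hS
  set D := l.drop N with hD
  have hSperm : S.Perm p := pvPassIter_perm N p
  have hSsorted : S.Pairwise (· ≤ ·) := pvPassIter_sorted N p (by simp [hp])
  -- A's final state
  have hfuel : (PySem.List.pyRange 0 input_n 1).length = N := by
    rw [PySem.List.length_pyRange_one]; omega
  have hstA : pvOuterA input_n (PySem.List.pyRange 0 input_n 1) 0 l
      = ((pvInv p : Int) - (pvInv S : Int), S ++ D) := by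
    rw [pvOuterA_eq_pvFIter input_n _ 0 l le_rfl hlen, hfuel, ← hN,
      pvFIter_spec N N 0 l hNle, ← hp, ← hS, ← hD]
    simp
  have hinvS : pvInv S = 0 := pvInv_sorted S hSsorted
  -- B's prefix slice
  have hpfx : PySem.List.slice l none (some (max input_n 0)) = p := by
    rw [PySem.List.slice_to l (le_max_right _ _)]
    have : (max input_n 0).toNat = N := by omega
    rw [this]
  -- the two sorted permutations of p coincide
  have hSC := pvSortCount_spec p
  have hSeq : (pvSortCount p).1 = S :=
    (hSC.1.trans hSperm.symm).eq_of_pairwise (fun a b _ _ h1 h2 => le_antisymm h1 h2) hSC.2.1 hSsorted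
  have hSl : S.length = N := by rw [hSperm.length_eq]; simp [hp]; omega
  simp only [bubble_sort_algorithm, bubble_sort_algorithm_alt, hstA, hpfx,
    hSC.2.2, hSeq, hinvS, hSl, PySem.List.slice_from_natCast, Nat.cast_zero, sub_zero]
  rfl

-- ===== VERDICT (by name: the statement is the Claim_ definition above) =====
theorem bubble_sort_algorithm_spec : Claim_equal_bubble_sort_algorithm := by
  intro input_n temp_list _hdom hpre
  unfold Spec_bubble_sort_algorithm
  exact final_assembly input_n temp_list hpre.1 hpre.2
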